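-- pv_equiv track=rewrite | github.com/kh277/BOJ | 백준/Silver/32627. 문자열 줄이기/문자열 줄이기.py | solve
-- ===== SOURCE A (Python) =====
-- def solve(N, M, S):
--     data = []
--     for i in range(N):
--         data.append([S[i], i])
--
--     # 정렬 후 문자 M개 제거
--     data.sort(key= lambda x: (x[0], x[1]))
--     data = data[M:]
--
--     # 인덱스 순서로 재정렬
--     data.sort(key= lambda x: (x[1], x[0]))
--     return ''.join([i[0] for i in data])
-- ===== SOURCE B (Python) =====
-- def solve(N, M, S):
--     # Counting sort over the ASCII alphabet: count each char of S[:N], find the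
--     # cutoff character and how many of its earliest occurrences fall among the
--     # M smallest (char, index) pairs, then emit the survivors in one pass.
--     counts = [0] * 128
--     for i in range(N):
--         counts[ord(S[i])] += 1
--
--     k = M
--     cutoff = 128
--     take = 0
--     for c in range(128):
--         if counts[c] <= k:
--             k -= counts[c]
--         else:
--             cutoff = c
--             take = k
--             break
--
--     out = []
--     for i in range(N):
--         c = ord(S[i])
--         if c < cutoff:
--             continue
--         elif c == cutoff and take > 0:
--             take -= 1
--         else:
--             out.append(S[i])
--     return ''.join(out)
-- ===== Notes on version B (the rewrite author's own statement) =====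
-- stated objective: faster
-- what changed: Replaces A's two comparison sorts over (char,index) pairs by a counting sort over the fixed 128-char ASCII alphabet: one counting pass finds the cutoff character and how many of its earliest occurrences are among the M smallest pairs, and a single linear pass emits the survivors.
-- outside the precondition, e.g. on solve(3, -1, 'cab'): A returns 'c', B returns 'cab'
import Mathlib
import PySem

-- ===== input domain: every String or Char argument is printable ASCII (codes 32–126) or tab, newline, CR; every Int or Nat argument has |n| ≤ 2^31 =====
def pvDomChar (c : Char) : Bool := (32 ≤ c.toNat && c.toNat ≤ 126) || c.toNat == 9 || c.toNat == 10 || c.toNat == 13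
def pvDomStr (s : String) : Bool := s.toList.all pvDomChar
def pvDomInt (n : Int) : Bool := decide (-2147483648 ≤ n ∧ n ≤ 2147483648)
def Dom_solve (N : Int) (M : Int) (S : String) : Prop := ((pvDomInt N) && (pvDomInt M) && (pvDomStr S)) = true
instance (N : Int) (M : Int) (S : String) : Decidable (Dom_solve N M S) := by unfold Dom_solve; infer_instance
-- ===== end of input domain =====

-- B replaces A's two comparison sorts by a counting sort over the fixed 128-slot ASCII
-- alphabet (objective: faster, asymptotically O(N + 128) vs O(N log N)).

-- ===== PORT A =====
def solve (N : Int) (M : Int) (S : String) : String :=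
  let data : List (Char × Int) :=
    (PySem.List.pyRange 0 N 1).foldl
      (fun acc i => acc ++ [(PySem.List.pyGetD S.toList i ' ', i)]) []
  let data := PySem.List.sorted2 data (fun x => x.1) (fun x => x.2)
  let data := PySem.List.slice data (some M) none
  let data := PySem.List.sorted2 data (fun x => x.2) (fun x => x.1)
  String.ofList (data.map (fun x => x.1))

-- ===== PORT B =====
-- counts[ord(S[i])] += 1 over i in range(N)
def bCounts (N : Int) (S : String) : List Int :=
  (PySem.List.pyRange 0 N 1).foldl
    (fun counts i =>
      let c : Int := ((PySem.List.pyGetD S.toList i ' ').toNat : Int)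
      PySem.List.pySetD counts c (PySem.List.pyGetD counts c 0 + 1))
    (List.replicate 128 0)

-- the 'for c in range(128): … break' scan, as recursion on c (termination on 128 - c)
def bFindCut (counts : List Int) (c : Nat) (k : Int) : Int × Int :=
  if c < 128 then
    let cc := PySem.List.pyGetD counts (c : Int) 0
    if cc ≤ k then bFindCut counts (c + 1) (k - cc) else ((c : Int), k)
  else ((128 : Int), 0)
  termination_by 128 - c

def solve_alt (N : Int) (M : Int) (S : String) : String :=
  let counts := bCounts N S
  let ct := bFindCut counts 0 M
  let cutoff := ct.1
  let res :=
    (PySem.List.pyRange 0 N 1).foldl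
      (fun st i =>
        let ch := PySem.List.pyGetD S.toList i ' '
        let c : Int := (ch.toNat : Int)
        if c < cutoff then st
        else if c = cutoff ∧ 0 < st.1 then (st.1 - 1, st.2)
        else (st.1, st.2 ++ [ch]))
      (ct.2, ([] : List Char))
  String.ofList res.2

-- ===== PRECONDITION & SPEC =====
-- Pre_ requires N ≤ len(S) (otherwise A raises IndexError on S[i]) and excludes the
-- negative M with 0 < M + max(N,0): M is a count of characters to remove, and on that
-- sliver A's value is an artefact of Python's negative-slice semantics (it removes
-- N+M characters); for M ≤ -max(N,0) the slice keeps everything and A = B is proved.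
def Pre_solve (N : Int) (M : Int) (S : String) : Prop :=
  (0 ≤ M ∨ M + max N 0 ≤ 0) ∧ N ≤ (S.toList.length : Int)
instance (N : Int) (M : Int) (S : String) : Decidable (Pre_solve N M S) := by
  unfold Pre_solve; infer_instance

def pvWitness_solve : Int × Int × String := (4, 2, "baca")

def Spec_solve (N : Int) (M : Int) (S : String) (out : String) : Prop := out = solve_alt N M S
instance (N : Int) (M : Int) (S : String) (out : String) : Decidable (Spec_solve N M S out) := by unfold Spec_solve; infer_instance

-- ===== CLAIM (what is proved, stated in full; the proofs are below) =====
def Claim_equal_solve : Prop := ∀ (N : Int) (M : Int) (S : String), Dom_solve N M S → Pre_solve N M S → Spec_solve N M S (solve N M S)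

-- ===== LEMMAS AND PROOFS =====

-- the processed prefix of the string
def pvT (N : Int) (S : String) : List Char := S.toList.take N.toNat
-- A's pair list [(S[i], i)]
def pvP (N : Int) (S : String) : List (Char × Int) :=
  (pvT N S).zipIdx.map (fun p => (p.1, (p.2 : Int)))
-- the (char, index) sort key, lexicographically
def pvKey (p : Char × Int) : Char ×ₗ Int := toLex (p.1, p.2)
-- number of pairs strictly smaller than p
def pvRank (P : List (Char × Int)) (p : Char × Int) : Nat :=
  P.countP (fun q => decide (pvKey q < pvKey p))
-- the common normal form: pairs of rank ≥ M, in original order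
def pvR (N M : Int) (S : String) : List (Char × Int) :=
  (pvP N S).filter (fun p => decide (M ≤ (pvRank (pvP N S) p : Int)))

def pvBelow (T : List Char) (v : Nat) : Nat := T.countP (fun c => decide (c.toNat < v))
def pvAt (T : List Char) (v : Nat) : Nat := T.countP (fun c => decide (c.toNat = v))

-- recursion form of B's final pass
def pvG (cut : Int) : List Char → Int → List Char
  | [], _ => []
  | ch :: l, t =>
    if ((ch.toNat : Int)) < cut then pvG cut l t
    else if ((ch.toNat : Int)) = cut ∧ 0 < t then pvG cut l (t - 1)
    else ch :: pvG cut l (t)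

-- === A-side lemmas ===
theorem sorted2_eq_sorted_lex {α κ₁ κ₂ : Type} [LinearOrder κ₁] [LinearOrder κ₂]
    (xs : List α) (k1 : α → κ₁) (k2 : α → κ₂) :
    PySem.List.sorted2 xs k1 k2 false
      = PySem.List.sorted xs (fun x => toLex (k1 x, k2 x)) false := by
  show List.foldl _ [] xs = List.foldl _ [] xs
  congr 1
  funext acc x
  congr 1
  funext a b
  show (decide (k1 a < k1 b) || !decide (k1 b < k1 a) && decide (k2 a < k2 b))
      = decide (toLex (k1 a, k2 a) < toLex (k1 b, k2 b))
  by_cases h1 : k1 a < k1 b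
  · simp [h1, Prod.Lex.lt_iff]
  · by_cases h2 : k1 b < k1 a
    · simp [h1, h2, Prod.Lex.lt_iff, ne_of_gt h2]
    · have : k1 a = k1 b := le_antisymm (not_lt.1 h2) (not_lt.1 h1)
      simp [Prod.Lex.lt_iff, this]

theorem pvKey_injective : Function.Injective pvKey := by
  intro p q h
  simpa [pvKey, Prod.ext_iff] using h

theorem pvP_pairwise_snd (N : Int) (S : String) :
    (pvP N S).Pairwise (fun p q => p.2 < q.2) := by
  unfold pvP
  rw [List.pairwise_map, List.pairwise_iff_getElem]
  intro i j hi hj hij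
  simp [List.getElem_zipIdx]
  omega

theorem data1_eq_pvP (N : Int) (S : String) (hlen : N ≤ (S.toList.length : Int)) :
    (PySem.List.pyRange 0 N 1).foldl
      (fun acc i => acc ++ [(PySem.List.pyGetD S.toList i ' ', i)]) []
      = pvP N S := by
  rw [PySem.List.foldl_append_singleton_eq_map, List.nil_append]
  apply List.ext_getElem
  · have h2 := hlen
    simp only [String.length_toList] at h2
    simp [PySem.List.length_pyRange_one, pvP, pvT]
    omega
  · intro k hk1 hk2
    have hkN : (k : Int) < N := by
      simpa [PySem.List.length_pyRange_one] using hk1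
    have hk0 : 0 ≤ (k : Int) := by positivity
    have hklen : k < S.toList.length := by
      have := hlen
      simp only [String.length_toList] at this ⊢
      omega
    rw [List.getElem_map, PySem.List.getElem_pyRange_one]
    simp only [pvP, pvT, List.getElem_map, List.getElem_zipIdx, zero_add]
    rw [PySem.List.pyGetD_eq_getElem _ _ hk0 (by simpa using hklen)]
    simp [List.getElem_take]


theorem drop_eq_filter_rank {α κ : Type} [LinearOrder κ] (key : α → κ) :
    ∀ (Q : List α), Q.Pairwise (fun a b => key a < key b) → ∀ m : Nat,
      Q.drop m = Q.filter (fun p => decide (m ≤ Q.countP (fun q => decide (key q < key p)))) := by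
  intro Q
  induction Q with
  | nil => intro _ m; simp
  | cons x t ih =>
    intro h m
    have hx : ∀ y ∈ t, key x < key y := fun y hy => (List.pairwise_cons.1 h).1 y hy
    have ht := (List.pairwise_cons.1 h).2
    have hcx : (x :: t).countP (fun q => decide (key q < key x)) = 0 := by
      rw [List.countP_eq_zero]
      intro q hq
      rcases List.mem_cons.1 hq with rfl | hq
      · simp
      · simp [not_lt.2 (le_of_lt (hx q hq))]
    have hcp : ∀ p ∈ t, (x :: t).countP (fun q => decide (key q < key p))
        = t.countP (fun q => decide (key q < key p)) + 1 := by
      intro p hp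
      rw [List.countP_cons]
      simp [hx p hp]
    cases m with
    | zero =>
      simp only [List.drop_zero]
      rw [List.filter_eq_self.2]
      intro a _; simp
    | succ m =>
      rw [List.drop_succ_cons, List.filter_cons, ih ht m]
      have : ¬ (m + 1 ≤ (x :: t).countP (fun q => decide (key q < key x))) := by
        rw [hcx]; omega
      simp only [this, decide_false]
      rw [if_neg (by simp)]
      apply List.filter_congr
      intro p hp
      rw [hcp p hp]
      simp only [decide_eq_decide]
      omega


theorem pvP_nodup (N : Int) (S : String) : (pvP N S).Nodup :=
  (pvP_pairwise_snd N S).imp (fun h he => by rw [he] at h; exact lt_irrefl _ h)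

theorem solve_eq_R' (N M : Int) (S : String) (hM0 : 0 ≤ M)
    (hlen : N ≤ (S.toList.length : Int)) :
    solve N M S = String.ofList ((pvR N M S).map (fun p => p.1)) := by
  simp only [solve]
  rw [data1_eq_pvP N S hlen]
  rw [sorted2_eq_sorted_lex, sorted2_eq_sorted_lex]
  set P := pvP N S with hP
  set key : Char × Int → Char ×ₗ Int := fun x => toLex (x.1, x.2) with hkey
  have hkeyeq : key = pvKey := by funext p; simp [pvKey, hkey]
  have hkeyinj : Function.Injective key := by rw [hkeyeq]; exact pvKey_injective
  set Q := PySem.List.sorted P key false with hQ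
  have hperm : Q.Perm P := PySem.List.sorted_perm P key false
  have hple : Q.Pairwise (fun a b => key a ≤ key b) := PySem.List.sorted_pairwise P key
  have hQnd : Q.Nodup := (hperm.nodup_iff).mpr (pvP_nodup N S)
  have hplt : Q.Pairwise (fun a b => key a < key b) :=
    (hple.and hQnd).imp (fun h => lt_of_le_of_ne h.1 (fun hk => h.2 (hkeyinj hk)))
  rw [PySem.List.slice_from _ hM0]
  rw [drop_eq_filter_rank key Q hplt M.toNat]
  have hfil : Q.filter (fun p => decide (M.toNat ≤ Q.countP fun q => decide (key q < key p)))
            = Q.filter (fun p => decide (M ≤ (pvRank P p : Int))) := by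
    apply List.filter_congr
    intro p _
    rw [List.Perm.countP_eq _ hperm]
    simp only [pvRank, ← hkeyeq]
    rw [decide_eq_decide]
    omega
  rw [hfil]
  have hpermF : (pvR N M S).Perm (Q.filter (fun p => decide (M ≤ (pvRank P p : Int)))) :=
    (hperm.filter _).symm
  have hpairR : (pvR N M S).Pairwise (fun a b => toLex (a.2, a.1) < toLex (b.2, b.1)) :=
    ((pvP_pairwise_snd N S).filter _).imp (fun h => Prod.Lex.lt_iff.2 (Or.inl h))
  rw [PySem.List.sorted_eq_of_perm_of_pairwise_lt _ _ _ hpermF hpairR]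

-- === B-side lemmas ===
theorem charlt_iff (a b : Char) : a < b ↔ a.toNat < b.toNat := by
  rw [Char.lt_def, UInt32.lt_iff_toNat_lt]; rfl

theorem chareq_iff (a b : Char) : a = b ↔ a.toNat = b.toNat := by
  rw [Char.ext_iff]
  exact ⟨fun h => by rw [show a.toNat = a.val.toNat from rfl, h]; rfl,
         fun h => UInt32.toNat_inj.1 h⟩

theorem foldl_pyRange_take {α β : Type} (xs : List α) (N : Int) (hN : N ≤ (xs.length : Int))
    (f : β → α → β) (init : β) (d : α) :
    (PySem.List.pyRange 0 N 1).foldl (fun acc j => f acc (PySem.List.pyGetD xs j d)) init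
      = (xs.take N.toNat).foldl f init := by
  by_cases h0 : 0 ≤ N
  · have hlen : ((xs.take N.toNat).length : Int) = N := by
      simp [List.length_take]; omega
    have hcong : (PySem.List.pyRange 0 N 1).foldl
          (fun acc j => f acc (PySem.List.pyGetD xs j d)) init
        = (PySem.List.pyRange 0 N 1).foldl
          (fun acc j => f acc (PySem.List.pyGetD (xs.take N.toNat) j d)) init := by
      apply PySem.List.foldl_congr_mem
      intro acc j hj
      have hj' := (PySem.List.mem_pyRange_one).1 hj
      rw [PySem.List.pyGetD_eq_getElem _ _ hj'.1 (by omega),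
          PySem.List.pyGetD_eq_getElem _ _ hj'.1 (by simp [List.length_take]; omega)]
      congr 1
      exact List.getElem_take.symm
    rw [hcong]
    have hr : PySem.List.pyRange 0 N 1
        = PySem.List.pyRange 0 ((xs.take N.toNat).length : Int) 1 := by rw [hlen]
    rw [hr, PySem.List.foldl_pyRange_zero_pyGetD' (List.take N.toNat xs) d f init]
  · rw [PySem.List.pyRange_one_eq_nil (by omega), List.take_eq_nil_iff.2 (Or.inl (by omega))]
    rfl

theorem pvBelow_zero (T : List Char) : pvBelow T 0 = 0 := by
  simp [pvBelow]

theorem pvBelow_succ (T : List Char) (v : Nat) :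
    pvBelow T (v + 1) = pvBelow T v + pvAt T v := by
  induction T with
  | nil => rfl
  | cons c t ih =>
    simp only [pvBelow, pvAt, List.countP_cons] at *
    rw [ih]
    by_cases h1 : c.toNat < v
    · simp [h1, Nat.lt_succ_of_lt h1, Nat.ne_of_lt h1]; omega
    · by_cases h2 : c.toNat = v
      · simp [h2]; omega
      · have : ¬ c.toNat < v + 1 := by omega
        simp [h1, h2, this]

theorem pvBelow_mono (T : List Char) {v w : Nat} (h : v ≤ w) :
    pvBelow T v ≤ pvBelow T w := by
  apply List.countP_mono_left
  intro c _ hc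
  simp only [decide_eq_true_eq] at *
  omega

theorem pvBelow_total (T : List Char) (h : ∀ c ∈ T, c.toNat < 128) :
    pvBelow T 128 = T.length := by
  unfold pvBelow
  rw [List.countP_eq_length]
  intro c hc
  simp [h c hc]

-- counts accumulation
theorem counts_fold_spec : ∀ (l : List Char) (init : List Int), init.length = 128 →
    (∀ c ∈ l, c.toNat < 128) → ∀ v : Nat, v < 128 →
    PySem.List.pyGetD
      (l.foldl (fun counts ch =>
        PySem.List.pySetD counts ((ch.toNat : Int))
          (PySem.List.pyGetD counts ((ch.toNat : Int)) 0 + 1)) init) ((v : Int)) 0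
      = PySem.List.pyGetD init ((v : Int)) 0 + (pvAt l v : Int) := by
  intro l
  induction l with
  | nil => intro init _ _ v _; simp [pvAt]
  | cons ch t ih =>
    intro init hlen hdom v hv
    have hch : ch.toNat < init.length := by rw [hlen]; exact hdom ch (by simp)
    rw [List.foldl_cons]
    rw [ih _ (by rw [PySem.List.length_pySetD, hlen]) (fun c hc => hdom c (by simp [hc])) v hv]
    rw [PySem.List.pyGetD_pySetD_natCast _ _ _ _ _ hch]
    simp only [pvAt, List.countP_cons]
    by_cases he : ch.toNat = v
    · rw [if_pos he.symm]   -- careful direction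
      simp [he]; omega
    · rw [if_neg (fun h => he h.symm)]
      simp [he]

theorem bFindCut_spec (T : List Char) (counts : List Int) (M : Int)
    (hc : ∀ v : Nat, v < 128 → PySem.List.pyGetD counts ((v : Int)) 0 = (pvAt T v : Int)) :
    ∀ (fuel c : Nat) (k : Int), fuel = 128 - c → c ≤ 128 →
      k = M - (pvBelow T c : Int) → 0 ≤ k →
      (∃ cut : Nat, bFindCut counts c k = ((cut : Int), M - (pvBelow T cut : Int)) ∧
          c ≤ cut ∧ cut < 128 ∧ (pvBelow T cut : Int) ≤ M ∧
          M < (pvBelow T cut : Int) + (pvAt T cut : Int))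
      ∨ (bFindCut counts c k = (128, 0) ∧ (pvBelow T 128 : Int) ≤ M) := by
  intro fuel
  induction fuel with
  | zero =>
    intro c k hfuel hc128 hk hk0
    have : c = 128 := by omega
    subst this
    have heq : bFindCut counts 128 k = (128, 0) := by rw [bFindCut]; simp
    right
    exact ⟨heq, by omega⟩
  | succ n ih =>
    intro c k hfuel hc128 hk hk0
    by_cases hlt : c < 128
    · rw [bFindCut]
      simp only [if_pos hlt]
      rw [hc c hlt]
      by_cases hle : (pvAt T c : Int) ≤ k
      · rw [if_pos hle]
        have := ih (c + 1) (k - (pvAt T c : Int)) (by omega) (by omega)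
          (by rw [pvBelow_succ]; push_cast; omega) (by omega)
        rcases this with ⟨cut, h1, h2, h3, h4, h5⟩ | h
        · exact Or.inl ⟨cut, h1, by omega, h3, h4, h5⟩
        · exact Or.inr h
      · rw [if_neg hle]
        exact Or.inl ⟨c, by rw [hk], le_refl c, hlt, by omega, by omega⟩
    · have : c = 128 := by omega
      subst this
      have heq : bFindCut counts 128 k = (128, 0) := by rw [bFindCut]; simp
      right
      exact ⟨heq, by omega⟩

def pList (T : List Char) : List (Char × Int) := T.zipIdx.map (fun p => (p.1, (p.2 : Int)))

theorem countP_fst_zipIdx {α : Type} (q : α → Bool) :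
    ∀ (l : List α) (n : Nat), (l.zipIdx n).countP (fun p => q p.1) = l.countP q := by
  intro l
  induction l with
  | nil => intro n; rfl
  | cons x t ih => intro n; rw [List.zipIdx_cons, List.countP_cons, List.countP_cons, ih]

theorem countP_le_split (v : Char) (l : List Char) :
    l.countP (fun x => decide (x ≤ v))
      = l.countP (fun x => decide (x < v)) + l.countP (fun x => decide (x = v)) := by
  induction l with
  | nil => rfl
  | cons x t ih =>
    simp only [List.countP_cons, ih]
    rcases lt_trichotomy x v with h | h | h
    · simp [h, le_of_lt h, ne_of_lt h]; omega
    · simp [h]; omega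
    · simp [not_le.2 h, not_lt.2 (le_of_lt h), ne_of_gt h]

theorem rank_eq (T : List Char) (k : Nat) (hk : k < T.length) :
    pvRank (pList T) (T[k], (k : Int))
      = pvBelow T (T[k].toNat) + (T.take k).count T[k] := by
  unfold pvRank pList
  rw [List.countP_map]
  simp only [Function.comp_def]
  have htk : (T.take k).length = k := by simp [List.length_take]; omega
  have hsplit : T.zipIdx = (T.take k).zipIdx ++ (T.drop k).zipIdx k := by
    conv_lhs => rw [← List.take_append_drop k T]
    rw [List.zipIdx_append, htk, Nat.zero_add]
  rw [hsplit, List.countP_append]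
  have hfront : List.countP (fun p => decide (pvKey (p.1, (p.2 : Int)) < pvKey (T[k], (k : Int))))
        ((T.take k).zipIdx)
      = (T.take k).countP (fun x => decide (x ≤ T[k])) := by
    have hcong : ∀ p ∈ (T.take k).zipIdx,
        (decide (pvKey (p.1, (p.2 : Int)) < pvKey (T[k], (k : Int))) = true
          ↔ (fun q : Char × Nat => decide (q.1 ≤ T[k])) p = true) := by
      rintro ⟨x, i⟩ hp
      have hi : i < k := by
        have := List.mem_zipIdx hp
        omega
      have hi' : (i : Int) < (k : Int) := by exact_mod_cast hi
      simp only [pvKey, Prod.Lex.lt_iff, ofLex_toLex, decide_eq_true_eq]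
      rw [le_iff_lt_or_eq, and_iff_left hi']
    rw [List.countP_congr hcong, countP_fst_zipIdx (fun x => decide (x ≤ T[k])) (T.take k) 0]
  have hback : List.countP (fun p => decide (pvKey (p.1, (p.2 : Int)) < pvKey (T[k], (k : Int))))
        ((T.drop k).zipIdx k)
      = (T.drop k).countP (fun x => decide (x < T[k])) := by
    have hcong : ∀ p ∈ (T.drop k).zipIdx k,
        (decide (pvKey (p.1, (p.2 : Int)) < pvKey (T[k], (k : Int))) = true
          ↔ (fun q : Char × Nat => decide (q.1 < T[k])) p = true) := by
      rintro ⟨x, i⟩ hp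
      have hi : k ≤ i := (List.mem_zipIdx hp).1
      have hi' : ¬ ((i : Int) < (k : Int)) := by
        simp only [not_lt]
        exact_mod_cast hi
      simp only [pvKey, Prod.Lex.lt_iff, ofLex_toLex, decide_eq_true_eq]
      rw [or_iff_left (fun h => hi' h.2)]
    rw [List.countP_congr hcong, countP_fst_zipIdx (fun x => decide (x < T[k])) (T.drop k) k]
  rw [hfront, hback, countP_le_split]
  have hb : pvBelow T (T[k].toNat) = T.countP (fun x => decide (x < T[k])) := by
    unfold pvBelow
    apply List.countP_congr
    intro x _
    simp only [decide_eq_true_eq]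
    rw [charlt_iff]
  have hTsplit : T.countP (fun x => decide (x < T[k]))
      = (T.take k).countP (fun x => decide (x < T[k]))
        + (T.drop k).countP (fun x => decide (x < T[k])) := by
    have h := congrArg (List.countP (fun x => decide (x < T[k]))) (List.take_append_drop k T)
    rw [List.countP_append] at h
    exact h.symm
  have hcnt : (T.take k).count T[k] = (T.take k).countP (fun x => decide (x = T[k])) := by
    rw [List.count_eq_countP]
    apply List.countP_congr
    intro x _
    simp
  rw [hb, hTsplit, hcnt]
  omega

theorem foldl_keep_eq_pvG (cut : Int) :
    ∀ (l : List Char) (t : Int) (acc : List Char),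
    (l.foldl (fun st ch =>
        if ((ch.toNat : Int)) < cut then st
        else if ((ch.toNat : Int)) = cut ∧ 0 < st.1 then (st.1 - 1, st.2)
        else (st.1, st.2 ++ [ch])) (t, acc)).2
      = acc ++ pvG cut l t := by
  intro l
  induction l with
  | nil => intro t acc; simp [pvG]
  | cons ch l ih =>
    intro t acc
    rw [List.foldl_cons]
    by_cases h1 : ((ch.toNat : Int)) < cut
    · rw [if_pos h1, ih]
      rw [pvG, if_pos h1]
    · by_cases h2 : ((ch.toNat : Int)) = cut ∧ 0 < t
      · rw [if_neg h1, if_pos h2, ih]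
        rw [pvG, if_neg h1, if_pos h2]
      · rw [if_neg h1, if_neg h2, ih]
        rw [pvG, if_neg h1, if_neg h2]
        simp

theorem pvG_all_lt (cut : Int) :
    ∀ (l : List Char) (t : Int), (∀ ch ∈ l, ((ch.toNat : Int)) < cut) → pvG cut l t = [] := by
  intro l
  induction l with
  | nil => intro t _; rfl
  | cons ch l ih =>
    intro t h
    rw [pvG, if_pos (h ch (by simp))]
    exact ih t (fun c hc => h c (by simp [hc]))

theorem keepIff (T : List Char) (M : Int) (cutN : Nat) (hdom : ∀ c ∈ T, c.toNat < 128)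
    (hcut : ((pvBelow T cutN : Int) ≤ M ∧ cutN < 128
              ∧ M < (pvBelow T cutN : Int) + (pvAt T cutN : Int))
            ∨ (cutN = 128 ∧ (T.length : Int) ≤ M))
    (k : Nat) (hk : k < T.length) :
    (M ≤ (pvRank (pList T) (T[k], (k : Int)) : Int))
      ↔ (cutN < T[k].toNat
          ∨ (T[k].toNat = cutN
              ∧ (M - (pvBelow T cutN : Int)) ≤ ((T.take k).count T[k] : Int))) := by
  rw [rank_eq T k hk]
  have hv128 : T[k].toNat < 128 := hdom _ (List.getElem_mem hk)
  -- the occurrence at position k is not counted in the prefix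
  have hbat : (T.take k).count T[k] < pvAt T (T[k].toNat) := by
    have hcC : pvAt T (T[k].toNat) = T.count T[k] := by
      unfold pvAt
      rw [List.count_eq_countP]
      apply List.countP_congr
      intro x _
      simp only [decide_eq_true_eq, beq_iff_eq]
      rw [chareq_iff]
    have hTsplit : T.count T[k] = (T.take k).count T[k] + (T.drop k).count T[k] := by
      have h := congrArg (List.count T[k]) (List.take_append_drop k T)
      rw [List.count_append] at h
      exact h.symm
    have hdropc : 0 < (T.drop k).count T[k] := by
      rw [List.drop_eq_getElem_cons hk, List.count_cons_self]
      omega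
    omega
  have hsucc : pvBelow T (T[k].toNat) + pvAt T (T[k].toNat) = pvBelow T (T[k].toNat + 1) :=
    (pvBelow_succ T _).symm
  have hbM : (pvBelow T cutN : Int) ≤ M := by
    rcases hcut with ⟨h, _, _⟩ | ⟨he, hle⟩
    · exact h
    · rw [he, pvBelow_total T hdom]; exact hle
  rcases Nat.lt_trichotomy (T[k].toNat) cutN with hlt | heq | hgt
  · -- char below the cutoff: always removed
    have hmono : pvBelow T (T[k].toNat + 1) ≤ pvBelow T cutN := pvBelow_mono T (by omega)
    constructor
    · intro h; exfalso; omega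
    · rintro (h | ⟨h, _⟩) <;> omega
  · -- the cutoff char itself
    constructor
    · intro h; right; exact ⟨heq, by rw [← heq]; omega⟩
    · rintro (h | ⟨_, h⟩)
      · omega
      · rw [← heq] at h; omega
  · -- char above the cutoff: always kept
    have hcl : cutN < 128 := by
      rcases hcut with ⟨_, h, _⟩ | ⟨he, _⟩
      · exact h
      · omega
    have hMlt : M < (pvBelow T (cutN + 1) : Int) := by
      rcases hcut with ⟨_, _, h⟩ | ⟨he, _⟩
      · have := pvBelow_succ T cutN; omega
      · omega
    have hmono : pvBelow T (cutN + 1) ≤ pvBelow T (T[k].toNat) := pvBelow_mono T (by omega)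
    constructor
    · intro _; exact Or.inl hgt
    · intro _; omega

theorem mainInd (T : List Char) (M : Int) (cutN : Nat) (hdom : ∀ c ∈ T, c.toNat < 128)
    (hcut : ((pvBelow T cutN : Int) ≤ M ∧ cutN < 128
              ∧ M < (pvBelow T cutN : Int) + (pvAt T cutN : Int))
            ∨ (cutN = 128 ∧ (T.length : Int) ≤ M)) :
    ∀ (l pre : List Char), T = pre ++ l → ∀ t : Int,
      t = max (M - (pvBelow T cutN : Int)
                - (pre.countP (fun c => decide (c.toNat = cutN)) : Int)) 0 →
    ((l.zipIdx pre.length).filter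
        (fun q => decide (M ≤ (pvRank (pList T) (q.1, (q.2 : Int)) : Int)))).map
          (fun q => q.1)
      = pvG ((cutN : Int)) l t := by
  intro l
  induction l with
  | nil => intro pre _ t _; simp [pvG]
  | cons ch l ih =>
    intro pre hT t ht
    rw [List.zipIdx_cons, List.filter_cons]
    have hk : pre.length < T.length := by rw [hT]; simp
    have hTk : T[pre.length] = ch := by
      simp [hT, List.getElem_append_right]
    have htake : T.take pre.length = pre := by rw [hT, List.take_left]
    have hiff := keepIff T M cutN hdom hcut pre.length hk
    rw [hTk, htake] at hiff
    have hT' : T = (pre ++ [ch]) ++ l := by rw [hT]; simp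
    have hlen' : (pre ++ [ch]).length = pre.length + 1 := by simp
    have hcnt' : ((pre ++ [ch]).countP (fun c => decide (c.toNat = cutN)) : Int)
        = (pre.countP (fun c => decide (c.toNat = cutN)) : Int)
          + (if ch.toNat = cutN then 1 else 0) := by
      rw [List.countP_append]
      simp only [List.countP_cons, List.countP_nil]
      push_cast
      split_ifs with h h2 <;> simp_all
    rcases Nat.lt_trichotomy ch.toNat cutN with hlt | heq | hgt
    · -- below the cutoff: both sides drop the char
      have hnk : ¬ (M ≤ (pvRank (pList T) (ch, (pre.length : Int)) : Int)) := by
        rw [hiff]; push_neg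
        exact ⟨by omega, fun h => absurd h (by omega)⟩
      rw [if_neg (by simpa using hnk)]
      rw [pvG, if_pos (by exact_mod_cast hlt)]
      have := ih (pre ++ [ch]) hT' t (by rw [hcnt', if_neg (by omega)]; omega)
      rw [hlen'] at this
      exact this
    · -- the cutoff char
      have hpc : ((pre.countP (fun c => decide (c.toNat = cutN))) : Int)
          = (pre.count ch : Int) := by
        congr 1
        rw [List.count_eq_countP]
        apply List.countP_congr
        intro x _
        simp only [decide_eq_true_eq, beq_iff_eq]
        rw [chareq_iff, heq]
      by_cases hpos : 0 < t
      · -- still removing occurrences of the cutoff char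
        have hnk : ¬ (M ≤ (pvRank (pList T) (ch, (pre.length : Int)) : Int)) := by
          rw [hiff]; push_neg
          exact ⟨by omega, fun _ => by omega⟩
        rw [if_neg (by simpa using hnk)]
        rw [pvG, if_neg (by omega), if_pos ⟨by exact_mod_cast heq, hpos⟩]
        have := ih (pre ++ [ch]) hT' (t - 1)
          (by rw [hcnt', if_pos heq]; omega)
        rw [hlen'] at this
        exact this
      · -- quota exhausted: keep it
        have hkp : (M ≤ (pvRank (pList T) (ch, (pre.length : Int)) : Int)) := by
          rw [hiff]
          right
          exact ⟨heq, by omega⟩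
        rw [if_pos (by simpa using hkp)]
        rw [pvG, if_neg (by omega), if_neg (fun h => hpos h.2)]
        rw [List.map_cons]
        have := ih (pre ++ [ch]) hT' t (by rw [hcnt', if_pos heq]; omega)
        rw [hlen'] at this
        rw [this]
    · -- above the cutoff: both sides keep the char
      have hkp : (M ≤ (pvRank (pList T) (ch, (pre.length : Int)) : Int)) := by
        rw [hiff]; exact Or.inl hgt
      rw [if_pos (by simpa using hkp)]
      rw [pvG, if_neg (by omega), if_neg (fun h => by
        have : ch.toNat = cutN := by exact_mod_cast h.1
        omega)]
      rw [List.map_cons]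
      have := ih (pre ++ [ch]) hT' t (by rw [hcnt', if_neg (by omega)]; omega)
      rw [hlen'] at this
      rw [this]

theorem solve_alt_eq_R' (N M : Int) (S : String) (hd : Dom_solve N M S) (hM0 : 0 ≤ M)
    (hlen : N ≤ (S.toList.length : Int)) :
    solve_alt N M S = String.ofList ((pvR N M S).map (fun p => p.1)) := by
  have hdomS : ∀ c ∈ S.toList, c.toNat < 128 := by
    intro c hc
    have hd' : pvDomStr S = true := by
      unfold Dom_solve at hd
      simp only [Bool.and_eq_true] at hd
      exact hd.2
    unfold pvDomStr at hd'
    rw [List.all_eq_true] at hd'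
    have := hd' c hc
    unfold pvDomChar at this
    simp only [Bool.or_eq_true, Bool.and_eq_true, decide_eq_true_eq, beq_iff_eq] at this
    omega
  have hdomT : ∀ c ∈ S.toList.take N.toNat, c.toNat < 128 :=
    fun c hc => hdomS c (List.mem_of_mem_take hc)
  have hcspec : ∀ v : Nat, v < 128 →
      PySem.List.pyGetD (bCounts N S) ((v : Int)) 0
        = (pvAt (S.toList.take N.toNat) v : Int) := by
    intro v hv
    unfold bCounts
    rw [foldl_pyRange_take S.toList N hlen
        (fun counts ch => PySem.List.pySetD counts ((ch.toNat : Int))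
            (PySem.List.pyGetD counts ((ch.toNat : Int)) 0 + 1))
        (List.replicate 128 0) ' ']
    rw [counts_fold_spec (S.toList.take N.toNat) (List.replicate 128 0) (by simp) hdomT v hv]
    rw [PySem.List.pyGetD_natCast]
    simp only [List.getD_eq_getElem?_getD, List.getElem?_replicate, hv, if_true]
    simp
  simp only [solve_alt]
  rw [foldl_pyRange_take S.toList N hlen
      (fun st ch =>
        if ((ch.toNat : Int)) < (bFindCut (bCounts N S) 0 M).1 then st
        else if ((ch.toNat : Int)) = (bFindCut (bCounts N S) 0 M).1 ∧ 0 < st.1 then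
          (st.1 - 1, st.2)
        else (st.1, st.2 ++ [ch]))
      ((bFindCut (bCounts N S) 0 M).2, ([] : List Char)) ' ']
  rw [foldl_keep_eq_pvG (bFindCut (bCounts N S) 0 M).1 (S.toList.take N.toNat)
      (bFindCut (bCounts N S) 0 M).2 [], List.nil_append]
  have hR : (pvR N M S).map (fun p => p.1)
      = (((S.toList.take N.toNat).zipIdx).filter
          (fun q => decide (M ≤ (pvRank (pList (S.toList.take N.toNat)) (q.1, (q.2 : Int)) : Int)))).map
            (fun q => q.1) := by
    unfold pvR
    rw [show pvP N S = pList (S.toList.take N.toNat) from rfl]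
    unfold pList
    rw [List.filter_map, List.map_map]
    simp [Function.comp_def]
  rw [hR]
  rcases bFindCut_spec (S.toList.take N.toNat) (bCounts N S) M hcspec 128 0 M rfl (by omega)
      (by rw [pvBelow_zero]; omega) (by omega) with
    ⟨cut, hre, _, hcutlt, hbelow, hupper⟩ | ⟨hre, htot⟩
  · have hmain := mainInd (S.toList.take N.toNat) M cut hdomT
      (Or.inl ⟨hbelow, hcutlt, hupper⟩) (S.toList.take N.toNat) [] rfl
      (M - (pvBelow (S.toList.take N.toNat) cut : Int)) (by simp; omega)
    rw [List.length_nil] at hmain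
    rw [hre]
    dsimp only
    rw [hmain]
  · have htot' : ((S.toList.take N.toNat).length : Int) ≤ M := by
      rw [← pvBelow_total (S.toList.take N.toNat) hdomT]; exact_mod_cast htot
    have hmain := mainInd (S.toList.take N.toNat) M 128 hdomT (Or.inr ⟨rfl, htot'⟩)
      (S.toList.take N.toNat) [] rfl
      (max (M - (pvBelow (S.toList.take N.toNat) 128 : Int)) 0) (by simp)
    rw [List.length_nil] at hmain
    rw [hre]
    dsimp only
    rw [hmain]
    rw [pvG_all_lt _ _ _ (fun ch hc => by exact_mod_cast hdomT ch hc),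
        pvG_all_lt _ _ _ (fun ch hc => by exact_mod_cast hdomT ch hc)]

-- === the corner admitted by Pre_ with M < 0: the slice keeps everything ===
theorem map_fst_zipIdx' {α : Type} : ∀ (l : List α) (n : Nat),
    (l.zipIdx n).map (fun p => p.1) = l := by
  intro l
  induction l with
  | nil => intro n; rfl
  | cons x t ih => intro n; rw [List.zipIdx_cons, List.map_cons, ih]

theorem pvG_zero_neg : ∀ (l : List Char) (t : Int), t ≤ 0 → pvG 0 l t = l := by
  intro l
  induction l with
  | nil => intro t _; rfl
  | cons ch t ih =>
    intro u hu
    rw [pvG, if_neg (by omega), if_neg (fun h => by omega)]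
    rw [ih u hu]

theorem solve_eq_all (N M : Int) (S : String) (hlen : N ≤ (S.toList.length : Int))
    (hM : M < 0) (hMn : M + max N 0 ≤ 0) :
    solve N M S = String.ofList (pvT N S) := by
  simp only [solve]
  rw [data1_eq_pvP N S hlen]
  rw [sorted2_eq_sorted_lex, sorted2_eq_sorted_lex]
  set P := pvP N S with hP
  set key : Char × Int → Char ×ₗ Int := fun x => toLex (x.1, x.2) with hkey
  set Q := PySem.List.sorted P key false with hQ
  have hperm : Q.Perm P := PySem.List.sorted_perm P key false
  have hQlen : Q.length ≤ (-M).toNat := by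
    have h1 : Q.length = P.length := hperm.length_eq
    have h2 : P.length = (S.toList.take N.toNat).length := by
      rw [hP]
      unfold pvP pvT
      simp
    have h3 : (S.toList.take N.toNat).length ≤ N.toNat := by
      simp [List.length_take]
    omega
  have hslice : PySem.List.slice Q (some M) none = Q := by
    rw [show M = -(((-M).toNat : Nat) : Int) by omega]
    rw [PySem.List.slice_from_neg_natCast _ _ (by omega)]
    rw [show Q.length - (-M).toNat = 0 by omega, List.drop_zero]
  rw [hslice]
  have hpairP2 : P.Pairwise (fun a b => toLex (a.2, a.1) < toLex (b.2, b.1)) :=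
    (pvP_pairwise_snd N S).imp (fun h => Prod.Lex.lt_iff.2 (Or.inl h))
  rw [PySem.List.sorted_eq_of_perm_of_pairwise_lt _ P _ hperm.symm hpairP2]
  rw [hP]
  unfold pvP
  rw [List.map_map]
  simp only [Function.comp_def]
  rw [map_fst_zipIdx']

theorem solve_alt_eq_all (N M : Int) (S : String) (hd : Dom_solve N M S)
    (hlen : N ≤ (S.toList.length : Int)) (hM : M < 0) :
    solve_alt N M S = String.ofList (pvT N S) := by
  have hdomS : ∀ c ∈ S.toList, c.toNat < 128 := by
    intro c hc
    have hd' : pvDomStr S = true := by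
      unfold Dom_solve at hd
      simp only [Bool.and_eq_true] at hd
      exact hd.2
    unfold pvDomStr at hd'
    rw [List.all_eq_true] at hd'
    have := hd' c hc
    unfold pvDomChar at this
    simp only [Bool.or_eq_true, Bool.and_eq_true, decide_eq_true_eq, beq_iff_eq] at this
    omega
  have hdomT : ∀ c ∈ S.toList.take N.toNat, c.toNat < 128 :=
    fun c hc => hdomS c (List.mem_of_mem_take hc)
  have hcspec : PySem.List.pyGetD (bCounts N S) ((0 : Nat) : Int) 0
      = (pvAt (S.toList.take N.toNat) 0 : Int) := by
    unfold bCounts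
    rw [foldl_pyRange_take S.toList N hlen
        (fun counts ch => PySem.List.pySetD counts ((ch.toNat : Int))
            (PySem.List.pyGetD counts ((ch.toNat : Int)) 0 + 1))
        (List.replicate 128 0) ' ']
    rw [counts_fold_spec (S.toList.take N.toNat) (List.replicate 128 0) (by simp) hdomT 0
        (by omega)]
    rw [PySem.List.pyGetD_natCast]
    simp only [List.getD_eq_getElem?_getD, List.getElem?_replicate]
    simp
  have hcut : bFindCut (bCounts N S) 0 M = (0, M) := by
    rw [bFindCut]
    rw [if_pos (by omega)]
    dsimp only
    rw [hcspec]
    rw [if_neg (by omega)]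
    simp
  simp only [solve_alt]
  rw [foldl_pyRange_take S.toList N hlen
      (fun st ch =>
        if ((ch.toNat : Int)) < (bFindCut (bCounts N S) 0 M).1 then st
        else if ((ch.toNat : Int)) = (bFindCut (bCounts N S) 0 M).1 ∧ 0 < st.1 then
          (st.1 - 1, st.2)
        else (st.1, st.2 ++ [ch]))
      ((bFindCut (bCounts N S) 0 M).2, ([] : List Char)) ' ']
  rw [foldl_keep_eq_pvG (bFindCut (bCounts N S) 0 M).1 (S.toList.take N.toNat)
      (bFindCut (bCounts N S) 0 M).2 [], List.nil_append]
  rw [hcut]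
  dsimp only
  rw [pvG_zero_neg _ M (le_of_lt hM)]
  rfl

-- ===== VERDICT (by name: the statement is the Claim_ definition above) =====
theorem solve_spec : Claim_equal_solve := by
  intro N M S hd hp
  unfold Spec_solve
  obtain ⟨hM, hlen⟩ := hp
  by_cases h0 : 0 ≤ M
  · rw [solve_eq_R' N M S h0 hlen, solve_alt_eq_R' N M S hd h0 hlen]
  · have hMn : M + max N 0 ≤ 0 := hM.resolve_left h0
    rw [solve_eq_all N M S hlen (by omega) hMn,
        solve_alt_eq_all N M S hd hlen (by omega)]
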